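-- pv_equiv track=rewrite | github.com/jojowither/JointERE | code/evaluation.py | record_zone
-- ===== SOURCE A (Python) =====
-- def record_zone(anay_rel, r_type):
--     zone_block = {'1~5':0, '6~10':0, '11~15':0, '16~20':0,
--                   '21~30':0, '31~40':0, '41~50':0, '50up':0}
--
--     for r_dist in anay_rel[r_type]:
--         if r_dist<=5:
--             zone_block['1~5']+=1
--         elif r_dist<=10:
--             zone_block['6~10']+=1
--         elif r_dist<=15:
--             zone_block['11~15']+=1
--         elif r_dist<=20:
--             zone_block['16~20']+=1
--         elif r_dist<=30:
--             zone_block['21~30']+=1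
--         elif r_dist<=40:
--             zone_block['31~40']+=1
--         elif r_dist<=50:
--             zone_block['41~50']+=1
--         else:
--             zone_block['50up']+=1
--
--     return zone_block
-- ===== SOURCE B (Python) =====
-- def record_zone(anay_rel, r_type):
--     dists = anay_rel[r_type]
--     bounds = [5, 10, 15, 20, 30, 40, 50]
--     labels = ['1~5', '6~10', '11~15', '16~20',
--               '21~30', '31~40', '41~50', '50up']
--     cum = [sum(1 for d in dists if d <= b) for b in bounds] + [len(dists)]
--     return {lab: hi - lo for lab, hi, lo in zip(labels, cum, [0] + cum)}
-- ===== Notes on version B (the rewrite author's own statement) =====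
-- stated objective: alternative
-- what changed: Instead of one pass that branches per element through an if/elif cascade, B never classifies individual elements: it makes eight staged counting passes computing cumulative counts of values below each boundary, and each bucket is the difference of two consecutive cumulative counts.
import Mathlib
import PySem

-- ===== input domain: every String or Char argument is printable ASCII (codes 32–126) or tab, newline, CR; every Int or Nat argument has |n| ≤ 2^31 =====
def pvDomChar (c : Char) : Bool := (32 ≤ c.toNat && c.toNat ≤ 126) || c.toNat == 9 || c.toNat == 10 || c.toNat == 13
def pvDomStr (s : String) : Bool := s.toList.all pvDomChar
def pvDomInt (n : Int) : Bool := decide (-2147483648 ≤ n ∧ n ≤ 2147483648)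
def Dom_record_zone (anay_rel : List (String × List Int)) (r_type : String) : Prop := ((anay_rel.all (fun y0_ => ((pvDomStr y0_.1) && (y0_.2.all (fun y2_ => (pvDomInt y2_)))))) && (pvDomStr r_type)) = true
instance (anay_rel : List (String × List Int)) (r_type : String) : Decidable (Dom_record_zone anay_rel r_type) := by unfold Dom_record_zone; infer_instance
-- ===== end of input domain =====

-- B replaces A's per-element if/elif classification pass with eight staged counting passes:
-- cumulative counts of values ≤ each boundary, bucket = difference of consecutive cumulatives (alternative).

-- ===== PORT A =====
def record_zone (anay_rel : List (String × List Int)) (r_type : String) : List (String × Int) :=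
  let zone_block : PySem.Dict String Int :=
    PySem.Dict.mk [("1~5", 0), ("6~10", 0), ("11~15", 0), ("16~20", 0),
                   ("21~30", 0), ("31~40", 0), ("41~50", 0), ("50up", 0)]
  match (PySem.Dict.mk anay_rel).get? r_type with
  | none => []  -- KeyError in Python; excluded by Pre_record_zone
  | some xs =>
    (xs.foldl (fun zb r_dist =>
      if r_dist ≤ 5 then zb.modify "1~5" 0 (· + 1)
      else if r_dist ≤ 10 then zb.modify "6~10" 0 (· + 1)
      else if r_dist ≤ 15 then zb.modify "11~15" 0 (· + 1)
      else if r_dist ≤ 20 then zb.modify "16~20" 0 (· + 1)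
      else if r_dist ≤ 30 then zb.modify "21~30" 0 (· + 1)
      else if r_dist ≤ 40 then zb.modify "31~40" 0 (· + 1)
      else if r_dist ≤ 50 then zb.modify "41~50" 0 (· + 1)
      else zb.modify "50up" 0 (· + 1)) zone_block).items

-- ===== PORT B =====
def record_zone_alt (anay_rel : List (String × List Int)) (r_type : String) : List (String × Int) :=
  match (PySem.Dict.mk anay_rel).get? r_type with
  | none => []  -- KeyError in Python; excluded by Pre_record_zone
  | some dists =>
    let bounds : List Int := [5, 10, 15, 20, 30, 40, 50]
    let labels : List String := ["1~5", "6~10", "11~15", "16~20", "21~30", "31~40", "41~50", "50up"]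
    -- 'sum(1 for d in dists if d <= b)' is a count of the elements ≤ b
    let cum : List Int := bounds.map (fun b => (dists.countP (fun d => decide (d ≤ b)) : Int)) ++ [(dists.length : Int)]
    -- '{lab: hi - lo for lab, hi, lo in zip(labels, cum, [0] + cum)}'
    (labels.zip (cum.zip ((0 : Int) :: cum))).map (fun p => (p.1, p.2.1 - p.2.2))

-- ===== PRECONDITION & SPEC =====
-- Pre_ excludes exactly r_type missing from the dict, where Python A raises KeyError.
def Pre_record_zone (anay_rel : List (String × List Int)) (r_type : String) : Prop :=
  r_type ∈ anay_rel.map Prod.fst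
instance (anay_rel : List (String × List Int)) (r_type : String) : Decidable (Pre_record_zone anay_rel r_type) := by unfold Pre_record_zone; infer_instance

def pvWitness_record_zone : (List (String × List Int)) × String := ([("r", [3, 12, 99])], "r")

def Spec_record_zone (anay_rel : List (String × List Int)) (r_type : String) (out : List (String × Int)) : Prop := out = record_zone_alt anay_rel r_type
instance (anay_rel : List (String × List Int)) (r_type : String) (out : List (String × Int)) : Decidable (Spec_record_zone anay_rel r_type out) := by unfold Spec_record_zone; infer_instance

-- ===== CLAIM (what is proved, stated in full; the proofs are below) =====
def Claim_equal_record_zone : Prop := ∀ (anay_rel : List (String × List Int)) (r_type : String), Dom_record_zone anay_rel r_type → Pre_record_zone anay_rel r_type → Spec_record_zone anay_rel r_type (record_zone anay_rel r_type)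

-- ===== LEMMAS AND PROOFS =====

-- Disjoint zone predicates (band membership), used to characterise A's fold.
def pvZ0 (d : Int) : Bool := decide (d ≤ 5)
def pvZ1 (d : Int) : Bool := !decide (d ≤ 5) && decide (d ≤ 10)
def pvZ2 (d : Int) : Bool := !decide (d ≤ 10) && decide (d ≤ 15)
def pvZ3 (d : Int) : Bool := !decide (d ≤ 15) && decide (d ≤ 20)
def pvZ4 (d : Int) : Bool := !decide (d ≤ 20) && decide (d ≤ 30)
def pvZ5 (d : Int) : Bool := !decide (d ≤ 30) && decide (d ≤ 40)
def pvZ6 (d : Int) : Bool := !decide (d ≤ 40) && decide (d ≤ 50)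
def pvZ7 (d : Int) : Bool := !decide (d ≤ 50)

-- A's fold, from arbitrary counter values, produces the band counts.
lemma record_zone_fold_eq (xs : List Int) :
    ∀ (c0 c1 c2 c3 c4 c5 c6 c7 : Int),
    (xs.foldl (fun zb r_dist =>
      if r_dist ≤ 5 then zb.modify "1~5" 0 (· + 1)
      else if r_dist ≤ 10 then zb.modify "6~10" 0 (· + 1)
      else if r_dist ≤ 15 then zb.modify "11~15" 0 (· + 1)
      else if r_dist ≤ 20 then zb.modify "16~20" 0 (· + 1)
      else if r_dist ≤ 30 then zb.modify "21~30" 0 (· + 1)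
      else if r_dist ≤ 40 then zb.modify "31~40" 0 (· + 1)
      else if r_dist ≤ 50 then zb.modify "41~50" 0 (· + 1)
      else zb.modify "50up" 0 (· + 1))
      (PySem.Dict.mk [("1~5", c0), ("6~10", c1), ("11~15", c2), ("16~20", c3),
                      ("21~30", c4), ("31~40", c5), ("41~50", c6), ("50up", c7)])).items
    = [("1~5", c0 + (xs.countP pvZ0 : Int)), ("6~10", c1 + (xs.countP pvZ1 : Int)),
       ("11~15", c2 + (xs.countP pvZ2 : Int)), ("16~20", c3 + (xs.countP pvZ3 : Int)),
       ("21~30", c4 + (xs.countP pvZ4 : Int)), ("31~40", c5 + (xs.countP pvZ5 : Int)),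
       ("41~50", c6 + (xs.countP pvZ6 : Int)), ("50up", c7 + (xs.countP pvZ7 : Int))] := by
  induction xs with
  | nil => intro c0 c1 c2 c3 c4 c5 c6 c7; simp
  | cons d xs ih =>
    intro c0 c1 c2 c3 c4 c5 c6 c7
    simp only [List.foldl_cons, List.countP_cons]
    by_cases h1 : d ≤ 5
    · simp only [if_pos h1]
      have e0 : pvZ0 d = true := by simp [pvZ0]; omega
      have e1 : pvZ1 d = false := by simp [pvZ1]; omega
      have e2 : pvZ2 d = false := by simp [pvZ2]; omega
      have e3 : pvZ3 d = false := by simp [pvZ3]; omega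
      have e4 : pvZ4 d = false := by simp [pvZ4]; omega
      have e5 : pvZ5 d = false := by simp [pvZ5]; omega
      have e6 : pvZ6 d = false := by simp [pvZ6]; omega
      have e7 : pvZ7 d = false := by simp [pvZ7]; omega
      rw [show (PySem.Dict.mk [("1~5", c0), ("6~10", c1), ("11~15", c2), ("16~20", c3), ("21~30", c4), ("31~40", c5), ("41~50", c6), ("50up", c7)]).modify "1~5" 0 (· + 1)
      = PySem.Dict.mk [("1~5", (c0 + 1)), ("6~10", c1), ("11~15", c2), ("16~20", c3), ("21~30", c4), ("31~40", c5), ("41~50", c6), ("50up", c7)] from rfl,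
      ih (c0 + 1) c1 c2 c3 c4 c5 c6 c7]
      simp [e0, e1, e2, e3, e4, e5, e6, e7, add_comm, add_left_comm]
    · by_cases h2 : d ≤ 10
      · simp only [if_neg h1, if_pos h2]
        have e0 : pvZ0 d = false := by simp [pvZ0]; omega
        have e1 : pvZ1 d = true := by simp [pvZ1]; omega
        have e2 : pvZ2 d = false := by simp [pvZ2]; omega
        have e3 : pvZ3 d = false := by simp [pvZ3]; omega
        have e4 : pvZ4 d = false := by simp [pvZ4]; omega
        have e5 : pvZ5 d = false := by simp [pvZ5]; omega
        have e6 : pvZ6 d = false := by simp [pvZ6]; omega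
        have e7 : pvZ7 d = false := by simp [pvZ7]; omega
        rw [show (PySem.Dict.mk [("1~5", c0), ("6~10", c1), ("11~15", c2), ("16~20", c3), ("21~30", c4), ("31~40", c5), ("41~50", c6), ("50up", c7)]).modify "6~10" 0 (· + 1)
        = PySem.Dict.mk [("1~5", c0), ("6~10", (c1 + 1)), ("11~15", c2), ("16~20", c3), ("21~30", c4), ("31~40", c5), ("41~50", c6), ("50up", c7)] from rfl,
        ih c0 (c1 + 1) c2 c3 c4 c5 c6 c7]
        simp [e0, e1, e2, e3, e4, e5, e6, e7, add_comm, add_left_comm]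
      · by_cases h3 : d ≤ 15
        · simp only [if_neg h1, if_neg h2, if_pos h3]
          have e0 : pvZ0 d = false := by simp [pvZ0]; omega
          have e1 : pvZ1 d = false := by simp [pvZ1]; omega
          have e2 : pvZ2 d = true := by simp [pvZ2]; omega
          have e3 : pvZ3 d = false := by simp [pvZ3]; omega
          have e4 : pvZ4 d = false := by simp [pvZ4]; omega
          have e5 : pvZ5 d = false := by simp [pvZ5]; omega
          have e6 : pvZ6 d = false := by simp [pvZ6]; omega
          have e7 : pvZ7 d = false := by simp [pvZ7]; omega
          rw [show (PySem.Dict.mk [("1~5", c0), ("6~10", c1), ("11~15", c2), ("16~20", c3), ("21~30", c4), ("31~40", c5), ("41~50", c6), ("50up", c7)]).modify "11~15" 0 (· + 1)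
          = PySem.Dict.mk [("1~5", c0), ("6~10", c1), ("11~15", (c2 + 1)), ("16~20", c3), ("21~30", c4), ("31~40", c5), ("41~50", c6), ("50up", c7)] from rfl,
          ih c0 c1 (c2 + 1) c3 c4 c5 c6 c7]
          simp [e0, e1, e2, e3, e4, e5, e6, e7, add_comm, add_left_comm]
        · by_cases h4 : d ≤ 20
          · simp only [if_neg h1, if_neg h2, if_neg h3, if_pos h4]
            have e0 : pvZ0 d = false := by simp [pvZ0]; omega
            have e1 : pvZ1 d = false := by simp [pvZ1]; omega
            have e2 : pvZ2 d = false := by simp [pvZ2]; omega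
            have e3 : pvZ3 d = true := by simp [pvZ3]; omega
            have e4 : pvZ4 d = false := by simp [pvZ4]; omega
            have e5 : pvZ5 d = false := by simp [pvZ5]; omega
            have e6 : pvZ6 d = false := by simp [pvZ6]; omega
            have e7 : pvZ7 d = false := by simp [pvZ7]; omega
            rw [show (PySem.Dict.mk [("1~5", c0), ("6~10", c1), ("11~15", c2), ("16~20", c3), ("21~30", c4), ("31~40", c5), ("41~50", c6), ("50up", c7)]).modify "16~20" 0 (· + 1)
            = PySem.Dict.mk [("1~5", c0), ("6~10", c1), ("11~15", c2), ("16~20", (c3 + 1)), ("21~30", c4), ("31~40", c5), ("41~50", c6), ("50up", c7)] from rfl,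
            ih c0 c1 c2 (c3 + 1) c4 c5 c6 c7]
            simp [e0, e1, e2, e3, e4, e5, e6, e7, add_comm, add_left_comm]
          · by_cases h5 : d ≤ 30
            · simp only [if_neg h1, if_neg h2, if_neg h3, if_neg h4, if_pos h5]
              have e0 : pvZ0 d = false := by simp [pvZ0]; omega
              have e1 : pvZ1 d = false := by simp [pvZ1]; omega
              have e2 : pvZ2 d = false := by simp [pvZ2]; omega
              have e3 : pvZ3 d = false := by simp [pvZ3]; omega
              have e4 : pvZ4 d = true := by simp [pvZ4]; omega
              have e5 : pvZ5 d = false := by simp [pvZ5]; omega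
              have e6 : pvZ6 d = false := by simp [pvZ6]; omega
              have e7 : pvZ7 d = false := by simp [pvZ7]; omega
              rw [show (PySem.Dict.mk [("1~5", c0), ("6~10", c1), ("11~15", c2), ("16~20", c3), ("21~30", c4), ("31~40", c5), ("41~50", c6), ("50up", c7)]).modify "21~30" 0 (· + 1)
              = PySem.Dict.mk [("1~5", c0), ("6~10", c1), ("11~15", c2), ("16~20", c3), ("21~30", (c4 + 1)), ("31~40", c5), ("41~50", c6), ("50up", c7)] from rfl,
              ih c0 c1 c2 c3 (c4 + 1) c5 c6 c7]
              simp [e0, e1, e2, e3, e4, e5, e6, e7, add_comm, add_left_comm]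
            · by_cases h6 : d ≤ 40
              · simp only [if_neg h1, if_neg h2, if_neg h3, if_neg h4, if_neg h5, if_pos h6]
                have e0 : pvZ0 d = false := by simp [pvZ0]; omega
                have e1 : pvZ1 d = false := by simp [pvZ1]; omega
                have e2 : pvZ2 d = false := by simp [pvZ2]; omega
                have e3 : pvZ3 d = false := by simp [pvZ3]; omega
                have e4 : pvZ4 d = false := by simp [pvZ4]; omega
                have e5 : pvZ5 d = true := by simp [pvZ5]; omega
                have e6 : pvZ6 d = false := by simp [pvZ6]; omega
                have e7 : pvZ7 d = false := by simp [pvZ7]; omega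
                rw [show (PySem.Dict.mk [("1~5", c0), ("6~10", c1), ("11~15", c2), ("16~20", c3), ("21~30", c4), ("31~40", c5), ("41~50", c6), ("50up", c7)]).modify "31~40" 0 (· + 1)
                = PySem.Dict.mk [("1~5", c0), ("6~10", c1), ("11~15", c2), ("16~20", c3), ("21~30", c4), ("31~40", (c5 + 1)), ("41~50", c6), ("50up", c7)] from rfl,
                ih c0 c1 c2 c3 c4 (c5 + 1) c6 c7]
                simp [e0, e1, e2, e3, e4, e5, e6, e7, add_comm, add_left_comm]
              · by_cases h7 : d ≤ 50
                · simp only [if_neg h1, if_neg h2, if_neg h3, if_neg h4, if_neg h5, if_neg h6, if_pos h7]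
                  have e0 : pvZ0 d = false := by simp [pvZ0]; omega
                  have e1 : pvZ1 d = false := by simp [pvZ1]; omega
                  have e2 : pvZ2 d = false := by simp [pvZ2]; omega
                  have e3 : pvZ3 d = false := by simp [pvZ3]; omega
                  have e4 : pvZ4 d = false := by simp [pvZ4]; omega
                  have e5 : pvZ5 d = false := by simp [pvZ5]; omega
                  have e6 : pvZ6 d = true := by simp [pvZ6]; omega
                  have e7 : pvZ7 d = false := by simp [pvZ7]; omega
                  rw [show (PySem.Dict.mk [("1~5", c0), ("6~10", c1), ("11~15", c2), ("16~20", c3), ("21~30", c4), ("31~40", c5), ("41~50", c6), ("50up", c7)]).modify "41~50" 0 (· + 1)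
                  = PySem.Dict.mk [("1~5", c0), ("6~10", c1), ("11~15", c2), ("16~20", c3), ("21~30", c4), ("31~40", c5), ("41~50", (c6 + 1)), ("50up", c7)] from rfl,
                  ih c0 c1 c2 c3 c4 c5 (c6 + 1) c7]
                  simp [e0, e1, e2, e3, e4, e5, e6, e7, add_comm, add_left_comm]
                · simp only [if_neg h1, if_neg h2, if_neg h3, if_neg h4, if_neg h5, if_neg h6, if_neg h7]
                  have e0 : pvZ0 d = false := by simp [pvZ0]; omega
                  have e1 : pvZ1 d = false := by simp [pvZ1]; omega
                  have e2 : pvZ2 d = false := by simp [pvZ2]; omega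
                  have e3 : pvZ3 d = false := by simp [pvZ3]; omega
                  have e4 : pvZ4 d = false := by simp [pvZ4]; omega
                  have e5 : pvZ5 d = false := by simp [pvZ5]; omega
                  have e6 : pvZ6 d = false := by simp [pvZ6]; omega
                  have e7 : pvZ7 d = true := by simp [pvZ7]; omega
                  rw [show (PySem.Dict.mk [("1~5", c0), ("6~10", c1), ("11~15", c2), ("16~20", c3), ("21~30", c4), ("31~40", c5), ("41~50", c6), ("50up", c7)]).modify "50up" 0 (· + 1)
                  = PySem.Dict.mk [("1~5", c0), ("6~10", c1), ("11~15", c2), ("16~20", c3), ("21~30", c4), ("31~40", c5), ("41~50", c6), ("50up", (c7 + 1))] from rfl,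
                  ih c0 c1 c2 c3 c4 c5 c6 (c7 + 1)]
                  simp [e0, e1, e2, e3, e4, e5, e6, e7, add_comm, add_left_comm]

-- Difference of cumulative counts = count of the band.
lemma countP_band (xs : List Int) (b1 b2 : Int) (h : b1 ≤ b2) :
    (xs.countP (fun d => decide (d ≤ b2)) : Int) - (xs.countP (fun d => decide (d ≤ b1)) : Int)
    = (xs.countP (fun d => !decide (d ≤ b1) && decide (d ≤ b2)) : Int) := by
  induction xs with
  | nil => simp
  | cons d xs ih =>
    simp only [List.countP_cons]
    by_cases h1 : d ≤ b1
    · simp [h1, show d ≤ b2 by omega]; omega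
    · by_cases h2 : d ≤ b2
      · simp [h1, h2]; omega
      · simp [h1, h2]; omega

-- Length minus the last cumulative count = count of the top band.
lemma countP_top (xs : List Int) :
    (xs.length : Int) - (xs.countP (fun d => decide (d ≤ 50)) : Int)
    = (xs.countP (fun d => !decide (d ≤ 50)) : Int) := by
  induction xs with
  | nil => simp
  | cons d xs ih =>
    simp only [List.countP_cons, List.length_cons]
    by_cases h : d ≤ 50 <;> simp [h] <;> omega

-- ===== VERDICT (by name: the statement is the Claim_ definition above) =====
theorem record_zone_spec : Claim_equal_record_zone := by
  intro anay_rel r_type _ hpre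
  unfold Spec_record_zone record_zone record_zone_alt
  cases hg : (PySem.Dict.mk anay_rel).get? r_type with
  | none =>
    exact absurd hpre (by
      have := (PySem.Dict.get?_eq_none_iff_not_mem_keys (d := PySem.Dict.mk anay_rel) (k := r_type)).mp hg
      simpa [PySem.Dict.keys, Pre_record_zone] using this)
  | some xs =>
    simp only
    rw [record_zone_fold_eq xs 0 0 0 0 0 0 0 0]
    simp only [List.map_cons, List.map_nil, List.cons_append, List.nil_append,
               List.zip_cons_cons, List.cons.injEq, Prod.mk.injEq]
    simp only [countP_band xs 5 10 (by omega), countP_band xs 10 15 (by omega),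
               countP_band xs 15 20 (by omega), countP_band xs 20 30 (by omega),
               countP_band xs 30 40 (by omega), countP_band xs 40 50 (by omega),
               countP_top xs]
    unfold pvZ0 pvZ1 pvZ2 pvZ3 pvZ4 pvZ5 pvZ6 pvZ7
    norm_num
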